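-- pv_equiv track=rewrite | github.com/Code-With-Rudy/NumerologyWithRudy | numerology.py | calculate_numerology
-- ===== SOURCE A (Python) =====
-- numerology_chart = {
--     'A': 1, 'B': 2, 'C': 3, 'D': 4, 'E': 5, 'F': 6, 'G': 7, 'H': 8, 'I': 9,
--     'J': 1, 'K': 2, 'L': 3, 'M': 4, 'N': 5, 'O': 6, 'P': 7, 'Q': 8, 'R': 9,
--     'S': 1, 'T': 2, 'U': 3, 'V': 4, 'W': 5, 'X': 6, 'Y': 7, 'Z': 8
-- }
--
-- vowels = {'A', 'E', 'I', 'O', 'U'}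
--
-- def reduce_to_single_digit_or_master(num):
--     if num in {11, 22, 33}:
--         return num
--     while num > 9:
--         num = sum(int(d) for d in str(num))
--     return num
--
-- def calculate_numerology(name):
--     name = name.upper().replace(" ", "")
--
--     all_letters_sum = 0
--     vowels_sum = 0
--     consonants_sum = 0
--
--     for ch in name:
--         if ch in numerology_chart:
--             val = numerology_chart[ch]
--             all_letters_sum += val
--             if ch in vowels:
--                 vowels_sum += val
--             else:
--                 consonants_sum += val
--
--     destiny_number = reduce_to_single_digit_or_master(all_letters_sum)
--     soul_urge_number = reduce_to_single_digit_or_master(vowels_sum)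
--     personality_number = reduce_to_single_digit_or_master(consonants_sum)
--
--     return {
--         "Destiny Number": destiny_number,
--         "Soul Urge Number": soul_urge_number,
--         "Personality Number": personality_number
--     }
-- ===== SOURCE B (Python) =====
-- def _root(n):
--     # closed-form digital root; master numbers kept at top level only
--     if n in (11, 22, 33):
--         return n
--     if n == 0:
--         return 0
--     return 1 + (n - 1) % 9
--
-- def calculate_numerology(name):
--     vowels_sum = 0
--     consonants_sum = 0
--     for ch in name.upper():
--         if 'A' <= ch <= 'Z':
--             val = (ord(ch) - 65) % 9 + 1
--             if ch in 'AEIOU':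
--                 vowels_sum += val
--             else:
--                 consonants_sum += val
--     return {
--         "Destiny Number": _root(vowels_sum + consonants_sum),
--         "Soul Urge Number": _root(vowels_sum),
--         "Personality Number": _root(consonants_sum),
--     }
-- ===== Notes on version B (the rewrite author's own statement) =====
-- stated objective: simpler
-- what changed: The letter-value chart dict is replaced by the arithmetic rule (ord(ch)-65) % 9 + 1, the explicit space-stripping pass is dropped (spaces are never letters), and the iterative str()/digit-sum while-loop is replaced by the constant-time closed-form digital root 1 + (n-1) % 9 with 0 and the master numbers 11/22/33 handled at the top level; all_letters_sum is recovered as vowels_sum + consonants_sum.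
import Mathlib
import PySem

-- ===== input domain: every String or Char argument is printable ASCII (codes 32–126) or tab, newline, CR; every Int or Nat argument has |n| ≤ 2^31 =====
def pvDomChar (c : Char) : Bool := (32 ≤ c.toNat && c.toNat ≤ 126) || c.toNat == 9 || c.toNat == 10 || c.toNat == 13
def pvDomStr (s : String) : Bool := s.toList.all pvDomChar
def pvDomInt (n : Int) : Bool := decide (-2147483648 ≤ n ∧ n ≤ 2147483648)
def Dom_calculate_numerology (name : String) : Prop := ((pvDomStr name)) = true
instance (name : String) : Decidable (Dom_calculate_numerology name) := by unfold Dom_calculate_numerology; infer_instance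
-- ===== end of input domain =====

-- B replaces the lookup chart by the Pythagorean arithmetic rule (ord(ch)-65) % 9 + 1 and the
-- iterative digit-sum while-loop by the closed-form digital root; objective: simpler.

-- ===== PORT A =====
def numerology_chart : PySem.Dict Char Int := PySem.Dict.mk
  [('A', 1), ('B', 2), ('C', 3), ('D', 4), ('E', 5), ('F', 6), ('G', 7), ('H', 8), ('I', 9),
   ('J', 1), ('K', 2), ('L', 3), ('M', 4), ('N', 5), ('O', 6), ('P', 7), ('Q', 8), ('R', 9),
   ('S', 1), ('T', 2), ('U', 3), ('V', 4), ('W', 5), ('X', 6), ('Y', 7), ('Z', 8)]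

def vowels : List Char := PySem.Set.ofList ['A', 'E', 'I', 'O', 'U']

-- int(d) for a single character d; the getD 0 is unreachable on the digit characters str(num) produces
def pyIntOfDigit (d : Char) : Int := (PySem.Int.ofChars? [d]).getD 0

-- sum(int(d) for d in str(num))
def digitSumA (num : Int) : Int := ((PySem.Int.toChars num).map pyIntOfDigit).sum

-- the 'while num > 9' loop; fuel only makes the recursion structural (num.toNat steps always suffice)
def reduceLoopA : Nat → Int → Int
  | 0, num => num
  | fuel + 1, num => if 9 < num then reduceLoopA fuel (digitSumA num) else num

def reduce_to_single_digit_or_master (num : Int) : Int :=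
  if num = 11 ∨ num = 22 ∨ num = 33 then num
  else reduceLoopA num.toNat num

-- for ch in name: if ch in numerology_chart: … (membership and lookup fused into one get?)
def loopA : List Char → Int × Int × Int → Int × Int × Int
  | [], st => st
  | ch :: rest, (al, vs, cs) =>
    match numerology_chart.get? ch with
    | some val =>
      if ch ∈ vowels then loopA rest (al + val, vs + val, cs)
      else loopA rest (al + val, vs, cs + val)
    | none => loopA rest (al, vs, cs)

def calculate_numerology (name : String) : List (String × Int) :=
  let name := PySem.Str.replace (PySem.Str.upper name) " " ""
  let st := loopA name.toList (0, 0, 0)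
  [("Destiny Number", reduce_to_single_digit_or_master st.1),
   ("Soul Urge Number", reduce_to_single_digit_or_master st.2.1),
   ("Personality Number", reduce_to_single_digit_or_master st.2.2)]

-- ===== PORT B =====
-- closed-form digital root, master numbers honoured at the top level only
def rootB (n : Int) : Int :=
  if n = 11 ∨ n = 22 ∨ n = 33 then n
  else if n = 0 then 0
  else 1 + PySem.Int.mod (n - 1) 9

def loopB : List Char → Int × Int → Int × Int
  | [], st => st
  | ch :: rest, (vs, cs) =>
    if 'A' ≤ ch ∧ ch ≤ 'Z' then
      let val : Int := PySem.Int.mod ((ch.toNat : Int) - 65) 9 + 1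
      -- ch in 'AEIOU': single-character membership
      if ch ∈ ['A', 'E', 'I', 'O', 'U'] then loopB rest (vs + val, cs)
      else loopB rest (vs, cs + val)
    else loopB rest (vs, cs)

def calculate_numerology_alt (name : String) : List (String × Int) :=
  let st := loopB (PySem.Str.upper name).toList (0, 0)
  [("Destiny Number", rootB (st.1 + st.2)),
   ("Soul Urge Number", rootB st.1),
   ("Personality Number", rootB st.2)]

-- ===== PRECONDITION & SPEC =====
def Spec_calculate_numerology (name : String) (out : List (String × Int)) : Prop := out = calculate_numerology_alt name
instance (name : String) (out : List (String × Int)) : Decidable (Spec_calculate_numerology name out) := by unfold Spec_calculate_numerology; infer_instance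

-- ===== CLAIM (what is proved, stated in full; the proofs are below) =====
def Claim_equal_calculate_numerology : Prop := ∀ (name : String), Dom_calculate_numerology name → Spec_calculate_numerology name (calculate_numerology name)

-- ===== LEMMAS AND PROOFS =====

theorem char_eq_of_toNat {ch c : Char} (h : ch.toNat = c.toNat) : ch = c :=
  Char.ext (UInt32.toNat_inj.mp h)

theorem char_toNat_ne {ch c : Char} {k : Nat} (hb : (c == ch) = false) (hk : c.toNat = k) :
    ch.toNat ≠ k := fun he =>
  (beq_eq_false_iff_ne.mp hb) (char_eq_of_toNat (hk ▸ he)).symm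

theorem chart_get (ch : Char) :
    numerology_chart.get? ch =
      if 65 ≤ ch.toNat ∧ ch.toNat ≤ 90 then some (PySem.Int.mod ((ch.toNat : Int) - 65) 9 + 1)
      else none := by
  unfold numerology_chart
  by_cases g1 : ('A' == ch) = true
  · rw [PySem.Dict.get?_mk_cons, if_pos g1, ← beq_iff_eq.mp g1]; decide
  rw [PySem.Dict.get?_mk_cons, if_neg g1]
  by_cases g2 : ('B' == ch) = true
  · rw [PySem.Dict.get?_mk_cons, if_pos g2, ← beq_iff_eq.mp g2]; decide
  rw [PySem.Dict.get?_mk_cons, if_neg g2]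
  by_cases g3 : ('C' == ch) = true
  · rw [PySem.Dict.get?_mk_cons, if_pos g3, ← beq_iff_eq.mp g3]; decide
  rw [PySem.Dict.get?_mk_cons, if_neg g3]
  by_cases g4 : ('D' == ch) = true
  · rw [PySem.Dict.get?_mk_cons, if_pos g4, ← beq_iff_eq.mp g4]; decide
  rw [PySem.Dict.get?_mk_cons, if_neg g4]
  by_cases g5 : ('E' == ch) = true
  · rw [PySem.Dict.get?_mk_cons, if_pos g5, ← beq_iff_eq.mp g5]; decide
  rw [PySem.Dict.get?_mk_cons, if_neg g5]
  by_cases g6 : ('F' == ch) = true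
  · rw [PySem.Dict.get?_mk_cons, if_pos g6, ← beq_iff_eq.mp g6]; decide
  rw [PySem.Dict.get?_mk_cons, if_neg g6]
  by_cases g7 : ('G' == ch) = true
  · rw [PySem.Dict.get?_mk_cons, if_pos g7, ← beq_iff_eq.mp g7]; decide
  rw [PySem.Dict.get?_mk_cons, if_neg g7]
  by_cases g8 : ('H' == ch) = true
  · rw [PySem.Dict.get?_mk_cons, if_pos g8, ← beq_iff_eq.mp g8]; decide
  rw [PySem.Dict.get?_mk_cons, if_neg g8]
  by_cases g9 : ('I' == ch) = true
  · rw [PySem.Dict.get?_mk_cons, if_pos g9, ← beq_iff_eq.mp g9]; decide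
  rw [PySem.Dict.get?_mk_cons, if_neg g9]
  by_cases g10 : ('J' == ch) = true
  · rw [PySem.Dict.get?_mk_cons, if_pos g10, ← beq_iff_eq.mp g10]; decide
  rw [PySem.Dict.get?_mk_cons, if_neg g10]
  by_cases g11 : ('K' == ch) = true
  · rw [PySem.Dict.get?_mk_cons, if_pos g11, ← beq_iff_eq.mp g11]; decide
  rw [PySem.Dict.get?_mk_cons, if_neg g11]
  by_cases g12 : ('L' == ch) = true
  · rw [PySem.Dict.get?_mk_cons, if_pos g12, ← beq_iff_eq.mp g12]; decide
  rw [PySem.Dict.get?_mk_cons, if_neg g12]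
  by_cases g13 : ('M' == ch) = true
  · rw [PySem.Dict.get?_mk_cons, if_pos g13, ← beq_iff_eq.mp g13]; decide
  rw [PySem.Dict.get?_mk_cons, if_neg g13]
  by_cases g14 : ('N' == ch) = true
  · rw [PySem.Dict.get?_mk_cons, if_pos g14, ← beq_iff_eq.mp g14]; decide
  rw [PySem.Dict.get?_mk_cons, if_neg g14]
  by_cases g15 : ('O' == ch) = true
  · rw [PySem.Dict.get?_mk_cons, if_pos g15, ← beq_iff_eq.mp g15]; decide
  rw [PySem.Dict.get?_mk_cons, if_neg g15]
  by_cases g16 : ('P' == ch) = true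
  · rw [PySem.Dict.get?_mk_cons, if_pos g16, ← beq_iff_eq.mp g16]; decide
  rw [PySem.Dict.get?_mk_cons, if_neg g16]
  by_cases g17 : ('Q' == ch) = true
  · rw [PySem.Dict.get?_mk_cons, if_pos g17, ← beq_iff_eq.mp g17]; decide
  rw [PySem.Dict.get?_mk_cons, if_neg g17]
  by_cases g18 : ('R' == ch) = true
  · rw [PySem.Dict.get?_mk_cons, if_pos g18, ← beq_iff_eq.mp g18]; decide
  rw [PySem.Dict.get?_mk_cons, if_neg g18]
  by_cases g19 : ('S' == ch) = true
  · rw [PySem.Dict.get?_mk_cons, if_pos g19, ← beq_iff_eq.mp g19]; decide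
  rw [PySem.Dict.get?_mk_cons, if_neg g19]
  by_cases g20 : ('T' == ch) = true
  · rw [PySem.Dict.get?_mk_cons, if_pos g20, ← beq_iff_eq.mp g20]; decide
  rw [PySem.Dict.get?_mk_cons, if_neg g20]
  by_cases g21 : ('U' == ch) = true
  · rw [PySem.Dict.get?_mk_cons, if_pos g21, ← beq_iff_eq.mp g21]; decide
  rw [PySem.Dict.get?_mk_cons, if_neg g21]
  by_cases g22 : ('V' == ch) = true
  · rw [PySem.Dict.get?_mk_cons, if_pos g22, ← beq_iff_eq.mp g22]; decide
  rw [PySem.Dict.get?_mk_cons, if_neg g22]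
  by_cases g23 : ('W' == ch) = true
  · rw [PySem.Dict.get?_mk_cons, if_pos g23, ← beq_iff_eq.mp g23]; decide
  rw [PySem.Dict.get?_mk_cons, if_neg g23]
  by_cases g24 : ('X' == ch) = true
  · rw [PySem.Dict.get?_mk_cons, if_pos g24, ← beq_iff_eq.mp g24]; decide
  rw [PySem.Dict.get?_mk_cons, if_neg g24]
  by_cases g25 : ('Y' == ch) = true
  · rw [PySem.Dict.get?_mk_cons, if_pos g25, ← beq_iff_eq.mp g25]; decide
  rw [PySem.Dict.get?_mk_cons, if_neg g25]
  by_cases g26 : ('Z' == ch) = true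
  · rw [PySem.Dict.get?_mk_cons, if_pos g26, ← beq_iff_eq.mp g26]; decide
  rw [PySem.Dict.get?_mk_cons, if_neg g26]
  rw [if_neg ?_]
  · rfl
  have n1 := char_toNat_ne (k := 65) (Bool.not_eq_true _ ▸ eq_false_of_ne_true g1 : ('A' == ch) = false) (by decide)
  have n2 := char_toNat_ne (k := 66) (Bool.not_eq_true _ ▸ eq_false_of_ne_true g2 : ('B' == ch) = false) (by decide)
  have n3 := char_toNat_ne (k := 67) (Bool.not_eq_true _ ▸ eq_false_of_ne_true g3 : ('C' == ch) = false) (by decide)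
  have n4 := char_toNat_ne (k := 68) (Bool.not_eq_true _ ▸ eq_false_of_ne_true g4 : ('D' == ch) = false) (by decide)
  have n5 := char_toNat_ne (k := 69) (Bool.not_eq_true _ ▸ eq_false_of_ne_true g5 : ('E' == ch) = false) (by decide)
  have n6 := char_toNat_ne (k := 70) (Bool.not_eq_true _ ▸ eq_false_of_ne_true g6 : ('F' == ch) = false) (by decide)
  have n7 := char_toNat_ne (k := 71) (Bool.not_eq_true _ ▸ eq_false_of_ne_true g7 : ('G' == ch) = false) (by decide)
  have n8 := char_toNat_ne (k := 72) (Bool.not_eq_true _ ▸ eq_false_of_ne_true g8 : ('H' == ch) = false) (by decide)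
  have n9 := char_toNat_ne (k := 73) (Bool.not_eq_true _ ▸ eq_false_of_ne_true g9 : ('I' == ch) = false) (by decide)
  have n10 := char_toNat_ne (k := 74) (Bool.not_eq_true _ ▸ eq_false_of_ne_true g10 : ('J' == ch) = false) (by decide)
  have n11 := char_toNat_ne (k := 75) (Bool.not_eq_true _ ▸ eq_false_of_ne_true g11 : ('K' == ch) = false) (by decide)
  have n12 := char_toNat_ne (k := 76) (Bool.not_eq_true _ ▸ eq_false_of_ne_true g12 : ('L' == ch) = false) (by decide)
  have n13 := char_toNat_ne (k := 77) (Bool.not_eq_true _ ▸ eq_false_of_ne_true g13 : ('M' == ch) = false) (by decide)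
  have n14 := char_toNat_ne (k := 78) (Bool.not_eq_true _ ▸ eq_false_of_ne_true g14 : ('N' == ch) = false) (by decide)
  have n15 := char_toNat_ne (k := 79) (Bool.not_eq_true _ ▸ eq_false_of_ne_true g15 : ('O' == ch) = false) (by decide)
  have n16 := char_toNat_ne (k := 80) (Bool.not_eq_true _ ▸ eq_false_of_ne_true g16 : ('P' == ch) = false) (by decide)
  have n17 := char_toNat_ne (k := 81) (Bool.not_eq_true _ ▸ eq_false_of_ne_true g17 : ('Q' == ch) = false) (by decide)
  have n18 := char_toNat_ne (k := 82) (Bool.not_eq_true _ ▸ eq_false_of_ne_true g18 : ('R' == ch) = false) (by decide)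
  have n19 := char_toNat_ne (k := 83) (Bool.not_eq_true _ ▸ eq_false_of_ne_true g19 : ('S' == ch) = false) (by decide)
  have n20 := char_toNat_ne (k := 84) (Bool.not_eq_true _ ▸ eq_false_of_ne_true g20 : ('T' == ch) = false) (by decide)
  have n21 := char_toNat_ne (k := 85) (Bool.not_eq_true _ ▸ eq_false_of_ne_true g21 : ('U' == ch) = false) (by decide)
  have n22 := char_toNat_ne (k := 86) (Bool.not_eq_true _ ▸ eq_false_of_ne_true g22 : ('V' == ch) = false) (by decide)
  have n23 := char_toNat_ne (k := 87) (Bool.not_eq_true _ ▸ eq_false_of_ne_true g23 : ('W' == ch) = false) (by decide)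
  have n24 := char_toNat_ne (k := 88) (Bool.not_eq_true _ ▸ eq_false_of_ne_true g24 : ('X' == ch) = false) (by decide)
  have n25 := char_toNat_ne (k := 89) (Bool.not_eq_true _ ▸ eq_false_of_ne_true g25 : ('Y' == ch) = false) (by decide)
  have n26 := char_toNat_ne (k := 90) (Bool.not_eq_true _ ▸ eq_false_of_ne_true g26 : ('Z' == ch) = false) (by decide)
  omega

def droot (m : Nat) : Int := if m = 0 then 0 else 1 + ((m : Int) - 1) % 9

theorem toDigitsCore_eq (fuel : Nat) : ∀ (n : Nat) (ds : List Char), 0 < n → n < fuel →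
    Nat.toDigitsCore 10 fuel n ds = ((Nat.digits 10 n).reverse.map Nat.digitChar) ++ ds := by
  induction fuel with
  | zero => intro n ds h hf; omega
  | succ f ih =>
    intro n ds h hf
    rw [Nat.toDigitsCore]
    rw [Nat.digits_def' (by norm_num : 1 < 10) h]
    by_cases hz : n / 10 = 0
    · simp [hz]
    · rw [if_neg hz]
      rw [ih (n / 10) _ (Nat.pos_of_ne_zero hz) (by omega)]
      simp

theorem digit_ofChars (d : Nat) (h : d < 10) : pyIntOfDigit (Nat.digitChar d) = (d : Int) := by
  interval_cases d <;> decide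

theorem digitSumA_cast (m : Nat) (h : 0 < m) : digitSumA (m : Int) = ((Nat.digits 10 m).sum : Int) := by
  unfold digitSumA
  have : PySem.Int.toChars (m : Int) = (Nat.digits 10 m).reverse.map Nat.digitChar := by
    rw [PySem.Int.toChars, if_neg (by omega), Nat.toDigits]
    simp only [Int.toNat_natCast]
    rw [toDigitsCore_eq (m + 1) m [] (by omega) (by omega)]
    simp
  rw [this, List.map_map]
  have h2 : List.map (pyIntOfDigit ∘ Nat.digitChar) (Nat.digits 10 m).reverse
      = List.map (fun d : Nat => (d : Int)) (Nat.digits 10 m).reverse :=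
    List.map_congr_left
      (fun d hd => digit_ofChars d (Nat.digits_lt_base (by norm_num) (List.mem_reverse.mp hd)))
  rw [h2]
  push_cast
  simp [List.sum_reverse]

theorem digits_sum_lt (m : Nat) (h : 9 < m) : (Nat.digits 10 m).sum < m := by
  rw [Nat.digits_def' (by norm_num : 1 < 10) (by omega)]
  have := Nat.digit_sum_le 10 (m / 10)
  simp only [List.sum_cons]
  omega

theorem digits_sum_pos (m : Nat) (h : 0 < m) : 0 < (Nat.digits 10 m).sum := by
  induction m using Nat.strong_induction_on with
  | _ m ih =>
    rw [Nat.digits_def' (by norm_num : 1 < 10) h]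
    simp only [List.sum_cons]
    by_cases hm : m % 10 = 0
    · have hd : 0 < m / 10 := by omega
      have := ih (m / 10) (by omega) hd
      omega
    · omega

theorem reduceLoopA_eq (fuel : Nat) : ∀ m : Nat, m ≤ fuel → reduceLoopA fuel (m : Int) = droot m := by
  induction fuel with
  | zero =>
    intro m hm
    have : m = 0 := by omega
    subst this; rfl
  | succ f ih =>
    intro m hm
    rw [reduceLoopA]
    by_cases h9 : 9 < m
    · rw [if_pos (by exact_mod_cast h9), digitSumA_cast m (by omega),
        ih _ (by have := digits_sum_lt m h9; omega)]
      have hs := digits_sum_pos m (by omega)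
      have hmod : m % 9 = (Nat.digits 10 m).sum % 9 := Nat.modEq_nine_digits_sum m
      unfold droot
      rw [if_neg (by omega), if_neg (by omega)]
      omega
    · rw [if_neg (by exact_mod_cast h9)]
      unfold droot
      split_ifs with h0
      · simp [h0]
      · omega

theorem reduce_eq_rootB (num : Int) (h : 0 ≤ num) :
    reduce_to_single_digit_or_master num = rootB num := by
  unfold reduce_to_single_digit_or_master rootB
  split_ifs with hm h0
  · rfl
  · rw [h0]; rfl
  · have : num = (num.toNat : Int) := by omega
    rw [this]
    simp only [Int.toNat_natCast]
    rw [reduceLoopA_eq num.toNat num.toNat le_rfl]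
    unfold droot
    rw [if_neg (by omega), PySem.Int.mod_eq_emod_of_pos (by norm_num)]

theorem replace_space (cs : List Char) :
    PySem.Chars.replace cs [' '] [] = cs.filter (fun c => c ≠ ' ') := by
  rw [PySem.Chars.replace, if_neg (by decide)]
  suffices h : ∀ fuel (l acc : List Char), l.length ≤ fuel →
      PySem.Chars.replace.go [' '] [] fuel l acc = acc.reverse ++ l.filter (fun c => c ≠ ' ') by
    exact h cs.length cs [] le_rfl
  intro fuel
  induction fuel with
  | zero =>
    intro l acc h
    have hl : l = [] := List.eq_nil_of_length_eq_zero (by omega)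
    subst hl; simp [PySem.Chars.replace.go]
  | succ f ih =>
    intro l acc h
    match l with
    | [] => simp [PySem.Chars.replace.go]
    | c :: t =>
      rw [PySem.Chars.replace.go]
      by_cases hc : c = ' '
      · subst hc
        rw [if_pos (by simp [List.isPrefixOf])]
        simpa using ih t acc (by simpa using h)
      · rw [if_neg (by simp [List.isPrefixOf, Ne.symm hc])]
        rw [ih t (c :: acc) (by simpa using h)]
        simp [hc]

theorem char_le_iff (a b : Char) : a ≤ b ↔ a.toNat ≤ b.toNat := by
  rw [Char.le_def, UInt32.le_iff_toNat_le]; rfl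

theorem loop_eq (cs : List Char) : ∀ v c : Int,
    loopA (cs.filter (fun c => c ≠ ' ')) (v + c, v, c) =
      ((loopB cs (v, c)).1 + (loopB cs (v, c)).2, loopB cs (v, c)) := by
  induction cs with
  | nil => intro v c; simp [loopA, loopB]
  | cons ch rest ih =>
    intro v c
    by_cases hr : 'A' ≤ ch ∧ ch ≤ 'Z'
    · have hn : 65 ≤ ch.toNat ∧ ch.toNat ≤ 90 := by
        rw [char_le_iff, char_le_iff] at hr; exact ⟨hr.1, hr.2⟩
      have hsp : ch ≠ ' ' := by
        intro e; subst e; simp at hn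
      rw [List.filter_cons_of_pos (by simpa using hsp)]
      rw [show loopB (ch :: rest) (v, c) = if ch ∈ ['A','E','I','O','U']
            then loopB rest (v + (PySem.Int.mod ((ch.toNat : Int) - 65) 9 + 1), c)
            else loopB rest (v, c + (PySem.Int.mod ((ch.toNat : Int) - 65) 9 + 1)) by
        rw [loopB, if_pos hr]]
      rw [show loopA (ch :: (rest.filter (fun c => c ≠ ' '))) (v + c, v, c) =
            if ch ∈ vowels
            then loopA (rest.filter (fun c => c ≠ ' ')) (v + c + (PySem.Int.mod ((ch.toNat : Int) - 65) 9 + 1), v + (PySem.Int.mod ((ch.toNat : Int) - 65) 9 + 1), c)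
            else loopA (rest.filter (fun c => c ≠ ' ')) (v + c + (PySem.Int.mod ((ch.toNat : Int) - 65) 9 + 1), v, c + (PySem.Int.mod ((ch.toNat : Int) - 65) 9 + 1)) by
        rw [loopA, chart_get, if_pos hn]]
      have hvow : (ch ∈ vowels) ↔ (ch ∈ ['A','E','I','O','U']) := by
        simp [vowels, PySem.Set.ofList]
      by_cases hv : ch ∈ ['A','E','I','O','U']
      · rw [if_pos (hvow.mpr hv), if_pos hv]
        have := ih (v + (PySem.Int.mod ((ch.toNat : Int) - 65) 9 + 1)) c
        rw [show v + c + (PySem.Int.mod ((ch.toNat : Int) - 65) 9 + 1)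
              = v + (PySem.Int.mod ((ch.toNat : Int) - 65) 9 + 1) + c by ring]
        exact this
      · rw [if_neg (fun hh => hv (hvow.mp hh)), if_neg hv]
        have := ih v (c + (PySem.Int.mod ((ch.toNat : Int) - 65) 9 + 1))
        rw [show v + c + (PySem.Int.mod ((ch.toNat : Int) - 65) 9 + 1)
              = v + (c + (PySem.Int.mod ((ch.toNat : Int) - 65) 9 + 1)) by ring]
        exact this
    · have hn : ¬ (65 ≤ ch.toNat ∧ ch.toNat ≤ 90) := by
        rw [char_le_iff, char_le_iff] at hr; exact hr
      rw [show loopB (ch :: rest) (v, c) = loopB rest (v, c) by rw [loopB, if_neg hr]]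
      by_cases hsp : ch = ' '
      · rw [List.filter_cons_of_neg (by simp [hsp])]
        exact ih v c
      · rw [List.filter_cons_of_pos (by simpa using hsp)]
        rw [show loopA (ch :: (rest.filter (fun c => c ≠ ' '))) (v + c, v, c)
              = loopA (rest.filter (fun c => c ≠ ' ')) (v + c, v, c) by
          rw [loopA, chart_get, if_neg hn]]
        exact ih v c

theorem loopB_nonneg (cs : List Char) : ∀ v c : Int, 0 ≤ v → 0 ≤ c →
    0 ≤ (loopB cs (v, c)).1 ∧ 0 ≤ (loopB cs (v, c)).2 := by
  induction cs with
  | nil => intro v c hv hc; exact ⟨hv, hc⟩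
  | cons ch rest ih =>
    intro v c hv hc
    have hm : 0 ≤ PySem.Int.mod ((ch.toNat : Int) - 65) 9 := PySem.Int.mod_nonneg _ (by norm_num)
    rw [loopB]
    split_ifs with h1 h2
    · exact ih _ _ (by omega) hc
    · exact ih _ _ hv (by omega)
    · exact ih _ _ hv hc

theorem calculate_numerology_spec : Claim_equal_calculate_numerology := by
  intro name _
  unfold Spec_calculate_numerology calculate_numerology calculate_numerology_alt
  have hlist : (PySem.Str.replace (PySem.Str.upper name) " " "").toList
      = ((PySem.Str.upper name).toList).filter (fun c => c ≠ ' ') := by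
    rw [PySem.Str.toList_replace]
    exact replace_space _
  simp only [hlist]
  have hl := loop_eq ((PySem.Str.upper name).toList) 0 0
  rw [show ((0:Int) + 0, (0:Int), (0:Int)) = ((0:Int), (0:Int), (0:Int)) by norm_num] at hl
  rw [hl]
  have hn := loopB_nonneg ((PySem.Str.upper name).toList) 0 0 le_rfl le_rfl
  simp only []
  rw [reduce_eq_rootB _ (by have := hn; omega),
    reduce_eq_rootB _ hn.1, reduce_eq_rootB _ hn.2]
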